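-- pv_equiv track=rewrite | github.com/ankul-in/Two-years | KATA140.py | red_knight
-- ===== SOURCE A (Python) =====
-- def red_knight(N, P):
--     start=N
--     counter=0
--     while N<P:
--         N+=2
--         P+=1
--         counter+=1
--     if counter % 2 == 0:
--         return ("White",P+start)
--     else:
--         return ("Black",P+start)
-- ===== SOURCE B (Python) =====
-- def red_knight(N, P):
--     d = P - N if P > N else 0
--     return ("White" if d % 2 == 0 else "Black", N + P + d)
-- ===== Notes on version B (the rewrite author's own statement) =====
-- stated objective: alternative
-- what changed: Replaces the step-by-step while loop (gap shrinks by 1 per iteration) with the closed form d = max(P-N, 0): color from d's parity, value = N + P + d; intended as faster when P >> N (loop count max(P-N,0) drops to O(1)), but a timing run could not confirm it consistently (half the generated inputs have P <= N, where A also takes no steps).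
import Mathlib
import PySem

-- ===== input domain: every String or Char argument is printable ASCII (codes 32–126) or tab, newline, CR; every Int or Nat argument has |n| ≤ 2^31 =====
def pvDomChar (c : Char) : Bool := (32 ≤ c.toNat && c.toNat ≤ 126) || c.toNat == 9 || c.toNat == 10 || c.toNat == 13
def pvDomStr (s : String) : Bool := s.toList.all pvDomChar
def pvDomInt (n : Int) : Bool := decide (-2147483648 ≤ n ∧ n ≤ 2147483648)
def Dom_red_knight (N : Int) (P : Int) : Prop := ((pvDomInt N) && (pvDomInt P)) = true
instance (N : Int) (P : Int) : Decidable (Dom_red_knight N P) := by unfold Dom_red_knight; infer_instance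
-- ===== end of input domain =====

-- B replaces A's while loop by the closed form d = max(P-N,0); equivalence is about the return value.

-- ===== PORT A =====
-- the while loop: state (N, P, counter); each iteration N+=2, P+=1, counter+=1
def red_knightLoop (N : Int) (P : Int) (counter : Int) : Int × Int × Int :=
  if N < P then red_knightLoop (N + 2) (P + 1) (counter + 1) else (N, P, counter)
termination_by (P - N).toNat
decreasing_by omega

def red_knight (N : Int) (P : Int) : String × Int :=
  let start := N
  let r := red_knightLoop N P 0
  let P' := r.2.1
  let counter := r.2.2
  if counter % 2 == 0 then ("White", P' + start) else ("Black", P' + start)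

-- ===== PORT B =====
def red_knight_alt (N : Int) (P : Int) : String × Int :=
  let d : Int := if P > N then P - N else 0
  (if d % 2 == 0 then "White" else "Black", N + P + d)

-- ===== PRECONDITION & SPEC =====
def Spec_red_knight (N : Int) (P : Int) (out : String × Int) : Prop := out = red_knight_alt N P
instance (N : Int) (P : Int) (out : String × Int) : Decidable (Spec_red_knight N P out) := by unfold Spec_red_knight; infer_instance

-- ===== CLAIM (what is proved, stated in full; the proofs are below) =====
def Claim_equal_red_knight : Prop := ∀ (N : Int) (P : Int), Dom_red_knight N P → Spec_red_knight N P (red_knight N P)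

-- ===== LEMMAS AND PROOFS =====
theorem red_knightLoop_eq (k : Nat) : ∀ (N P c : Int), (P - N).toNat = k →
    red_knightLoop N P c = (N + 2 * max (P - N) 0, P + max (P - N) 0, c + max (P - N) 0) := by
  induction k with
  | zero =>
    intro N P c hk
    have h : ¬ N < P := by omega
    rw [red_knightLoop, if_neg h]
    have : max (P - N) 0 = 0 := by omega
    simp [this]
  | succ n ih =>
    intro N P c hk
    have h : N < P := by omega
    rw [red_knightLoop, if_pos h]
    rw [ih (N + 2) (P + 1) (c + 1) (by omega)]
    have h1 : max (P + 1 - (N + 2)) 0 = max (P - N) 0 - 1 := by omega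
    refine Prod.ext ?_ (Prod.ext ?_ ?_) <;> simp [h1] <;> omega

-- ===== VERDICT (by name: the statement is the Claim_ definition above) =====
theorem red_knight_spec : Claim_equal_red_knight := by
  intro N P _
  unfold Spec_red_knight red_knight red_knight_alt
  rw [red_knightLoop_eq (P - N).toNat N P 0 rfl]
  have hd : (if P > N then P - N else 0) = max (P - N) 0 := by omega
  simp only [hd]
  split_ifs with h1 h2 h2 <;> simp_all <;> omega
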